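-- pv_equiv track=rewrite | github.com/lukaszbrodzki/LetCode-LongestPolygon | main.py | largestPerimeter2
-- ===== SOURCE A (Python) =====
-- def largestPerimeter2(nums: [int]) -> int:
--     if len(nums) < 3:
--         return -1
--
--     nums.sort(reverse=True)
--     total_sum = sum(nums)
--
--     i = 0
--     while i < len(nums):
--         total_sum -= nums[i]
--
--         if total_sum <= nums[i]:
--             nums.pop(0)
--             i -= 1
--         else:
--             break
--
--         if len(nums) < 3:
--             return -1
--         i += 1
--
--     return sum(nums)
-- ===== SOURCE B (Python) =====
-- def largestPerimeter2(nums: [int]) -> int: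
--     s = sorted(nums)
--     total = sum(s)
--     for i in range(len(s) - 1, 1, -1):
--         total -= s[i]
--         if total > s[i]:
--             return total + s[i]
--     return -1
-- ===== Notes on version B (the rewrite author's own statement) =====
-- stated objective: alternative
-- what changed: A sorts descending and repeatedly pops the largest element off the front of the mutated list, re-checking the remainder; B sorts ascending once and makes a single non-mutating index scan from the top with a running sum, returning at the first index whose smaller sides outweigh it (both are sort-dominated on typical inputs, so no speed is claimed).
import Mathlib
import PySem

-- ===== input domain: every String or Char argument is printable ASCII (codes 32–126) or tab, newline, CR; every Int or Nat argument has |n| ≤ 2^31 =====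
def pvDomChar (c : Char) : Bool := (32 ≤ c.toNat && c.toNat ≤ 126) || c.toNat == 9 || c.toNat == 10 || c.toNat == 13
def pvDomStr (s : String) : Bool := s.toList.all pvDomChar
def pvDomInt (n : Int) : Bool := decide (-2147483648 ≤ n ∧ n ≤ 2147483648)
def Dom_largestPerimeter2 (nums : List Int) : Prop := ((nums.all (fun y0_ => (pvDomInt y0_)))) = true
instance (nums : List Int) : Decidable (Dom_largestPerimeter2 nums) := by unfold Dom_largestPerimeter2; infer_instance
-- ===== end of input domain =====

-- B replaces A's destructive pop-the-largest loop (sort descending, repeatedly pop and re-check)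
-- by a single non-mutating scan over the ascending sort with a running sum; equivalence of return
-- values is proved (A mutates its argument in place — sort + pops — B does not; the claim is about
-- the RETURN value only).


-- ===== PORT A =====
-- A's while-loop: i stays, nums is popped at the front; nums[i] is always in range when reached,
-- so pyGetD (total form of nums[i]) is exact here.
def pvLoopA (nums : List Int) (total_sum : Int) (i : Int) : Int :=
  if i < (nums.length : Int) then
    let v := PySem.List.pyGetD nums i 0
    let total_sum := total_sum - v
    if total_sum ≤ v then
      let nums' := nums.tail          -- nums.pop(0)
      if (nums'.length : Int) < 3 then -1
      else pvLoopA nums' total_sum ((i - 1) + 1)   -- i -= 1 then i += 1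
    else nums.sum                      -- break; return sum(nums)
  else nums.sum
termination_by nums.length
decreasing_by
  cases nums with
  | nil => simp at *
  | cons a l => simp

def largestPerimeter2 (nums : List Int) : Int :=
  if (nums.length : Int) < 3 then -1
  else
    let s := PySem.List.sorted nums (fun x => x) true   -- nums.sort(reverse=True)
    pvLoopA s s.sum 0

-- ===== PORT B =====
-- Source B's for-loop over range(len(s)-1, 1, -1) with running total and early return.
def pvScanB (s : List Int) (total : Int) : List Int → Int
  | [] => -1
  | i :: rest =>
    let v := PySem.List.pyGetD s i 0
    let total := total - v
    if v < total then total + v else pvScanB s total rest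

def largestPerimeter2_alt (nums : List Int) : Int :=
  let s := PySem.List.sorted nums (fun x => x) false
  pvScanB s s.sum (PySem.List.pyRange ((s.length : Int) - 1) 1 (-1))

-- ===== PRECONDITION & SPEC =====
def Spec_largestPerimeter2 (nums : List Int) (out : Int) : Prop := out = largestPerimeter2_alt nums
instance (nums : List Int) (out : Int) : Decidable (Spec_largestPerimeter2 nums out) := by unfold Spec_largestPerimeter2; infer_instance

-- ===== CLAIM (what is proved, stated in full; the proofs are below) =====
def Claim_equal_largestPerimeter2 : Prop := ∀ (nums : List Int), Dom_largestPerimeter2 nums → Spec_largestPerimeter2 nums (largestPerimeter2 nums)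

-- ===== LEMMAS AND PROOFS =====

-- Python's sorted(xs, reverse=True) on Int values is the reverse of sorted(xs).
lemma pvSortedRev (xs : List Int) :
    PySem.List.sorted xs (fun x => x) true = (PySem.List.sorted xs (fun x => x) false).reverse := by
  have h1 : ((PySem.List.sorted xs (fun x => x) true).reverse).Perm xs :=
    (List.reverse_perm _).trans (PySem.List.sorted_perm ..)
  have h2 : ((PySem.List.sorted xs (fun x => x) true).reverse).Pairwise (fun a b : Int => a ≤ b) := by
    rw [List.pairwise_reverse]
    exact PySem.List.sorted_pairwise_rev ..
  have := PySem.List.sorted_id_eq_of_perm_of_pairwise _ _ h1 h2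
  rw [this, List.reverse_reverse]

-- One unfolding step of A's loop at the front element t[k] of the reversed prefix.
lemma pvStepA (t : List Int) (k : Nat) (hlt : k < t.length) :
    pvLoopA ((t.take (k+1)).reverse) ((t.take (k+1)).sum) 0 =
      if (t.take k).sum ≤ t[k] then
        (if (k : Int) < 3 then -1 else pvLoopA ((t.take k).reverse) ((t.take k).sum) 0)
      else (t.take k).sum + t[k] := by
  have htake : t.take (k+1) = t.take k ++ [t[k]] := by
    rw [List.take_add_one]; simp [List.getElem?_eq_getElem hlt]
  have hrev : (t.take (k+1)).reverse = t[k] :: (t.take k).reverse := by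
    rw [htake]; simp
  have hsum : (t.take (k+1)).sum = (t.take k).sum + t[k] := by
    rw [htake, List.sum_append, List.sum_cons, List.sum_nil]; ring
  have hklen : ((t.take k).reverse).length = k := by
    simp [List.length_take]; omega
  rw [hrev, hsum, pvLoopA]
  simp only [List.length_cons, hklen, PySem.List.pyGetD_zero_cons, List.tail_cons,
    List.sum_cons, List.sum_reverse]
  rw [if_pos (by exact_mod_cast Nat.succ_pos k)]
  have h0 : (t.take k).sum + t[k] - t[k] = (t.take k).sum := by ring
  rw [h0]
  split_ifs <;> first | rfl | ring

-- One unfolding step of B's scan at index k of the range.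
lemma pvStepB (t : List Int) (k : Nat) (hk : 2 ≤ k) (hlt : k < t.length) :
    pvScanB t ((t.take (k+1)).sum) (PySem.List.pyRange (k : Int) 1 (-1)) =
      if t[k] < (t.take k).sum then (t.take k).sum + t[k]
      else pvScanB t ((t.take k).sum) (PySem.List.pyRange ((k : Int) - 1) 1 (-1)) := by
  have htake : t.take (k+1) = t.take k ++ [t[k]] := by
    rw [List.take_add_one]; simp [List.getElem?_eq_getElem hlt]
  have hsum : (t.take (k+1)).sum = (t.take k).sum + t[k] := by
    rw [htake, List.sum_append, List.sum_cons, List.sum_nil]; ring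
  have hcons : PySem.List.pyRange (k : Int) 1 (-1) = (k : Int) :: PySem.List.pyRange ((k : Int) - 1) 1 (-1) :=
    PySem.List.pyRange_neg_one_cons (by exact_mod_cast Nat.lt_of_lt_of_le Nat.one_lt_two hk)
  have hget : PySem.List.pyGetD t (k : Int) 0 = t[k] := by
    rw [PySem.List.pyGetD_natCast]; exact List.getD_eq_getElem _ _ hlt
  rw [hcons, hsum, pvScanB]
  simp only [hget]
  have h0 : (t.take k).sum + t[k] - t[k] = (t.take k).sum := by ring
  rw [h0]

-- A's loop on the reversed prefix of length k+1 equals B's scan over range(k, 1, -1).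
lemma pvMain (t : List Int) (k : Nat) (hk : 2 ≤ k) (hlt : k < t.length) :
    pvLoopA ((t.take (k+1)).reverse) ((t.take (k+1)).sum) 0
      = pvScanB t ((t.take (k+1)).sum) (PySem.List.pyRange (k : Int) 1 (-1)) := by
  induction k, hk using Nat.le_induction with
  | base =>
    rw [pvStepA t 2 hlt, pvStepB t 2 (by omega) hlt]
    have hnil : PySem.List.pyRange (((2:Nat) : Int) - 1) 1 (-1) = [] := by
      apply PySem.List.pyRange_neg_one_eq_nil; norm_num
    by_cases h : (t.take 2).sum ≤ t[2]
    · rw [if_pos h, if_neg (show ¬(t[2] < (t.take 2).sum) from by omega),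
        if_pos (show (((2:Nat)) : Int) < 3 from by norm_num), hnil, pvScanB]
    · rw [if_neg h, if_pos (show t[2] < (t.take 2).sum from by omega)]
  | succ k hk2 ih =>
    rw [pvStepA t (k+1) hlt, pvStepB t (k+1) (by omega) hlt]
    have hcast : (((k+1:Nat)) : Int) - 1 = ((k:Nat) : Int) := by push_cast; ring
    by_cases h : (t.take (k+1)).sum ≤ t[k+1]
    · rw [if_pos h, if_neg (show ¬(t[k+1] < (t.take (k+1)).sum) from by omega),
        if_neg (show ¬((((k+1:Nat)) : Int) < 3) from by push_cast; omega),
        hcast, ih (by omega)]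
    · rw [if_neg h, if_pos (show t[k+1] < (t.take (k+1)).sum from by omega)]

-- ===== VERDICT (by name: the statement is the Claim_ definition above) =====
theorem largestPerimeter2_spec : Claim_equal_largestPerimeter2 := by
  intro nums _
  unfold Spec_largestPerimeter2 largestPerimeter2 largestPerimeter2_alt
  have hlen : (PySem.List.sorted nums (fun x => x) false).length = nums.length :=
    PySem.List.length_sorted ..
  set t := PySem.List.sorted nums (fun x => x) false with ht
  by_cases h : (nums.length : Int) < 3
  · rw [if_pos h]
    have hnil : PySem.List.pyRange ((t.length : Int) - 1) 1 (-1) = [] := by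
      apply PySem.List.pyRange_neg_one_eq_nil; rw [hlen]; omega
    show (-1 : Int) = pvScanB t t.sum (PySem.List.pyRange ((t.length : Int) - 1) 1 (-1))
    rw [hnil, pvScanB]
  · rw [if_neg h, pvSortedRev, ← ht]
    show pvLoopA t.reverse t.reverse.sum 0
      = pvScanB t t.sum (PySem.List.pyRange ((t.length : Int) - 1) 1 (-1))
    have hmain := pvMain t (t.length - 1) (by omega) (by omega)
    rw [show t.length - 1 + 1 = t.length from by omega, List.take_length] at hmain
    rw [List.sum_reverse, hmain,
      show ((t.length - 1 : Nat) : Int) = (t.length : Int) - 1 from by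
        have : 1 ≤ t.length := by omega
        push_cast [this]; ring]
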